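-- pv_equiv track=rewrite | github.com/Ricefrog/walPy | walPy.py | merge_color_map
-- ===== SOURCE A (Python) =====
-- from collections import defaultdict
--
-- tolerance = 20
--
-- def is_similar(col_1, col_2):
--     if (abs(col_1[0] - col_2[0]) < tolerance
--             and abs(col_1[1] - col_2[1]) < tolerance
--             and abs(col_1[2] - col_2[2]) < tolerance):
--         return True
--     return False
--
-- def merge_color_map(color_map):
--     new_color_map = defaultdict(lambda: [])
--
--     for key, val in color_map.items():
--         similar = False
--         for col in new_color_map.keys():
--             if is_similar(key, col):
--                 similar = True
--                 new_color_map[col] += val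
--                 break
--         if not similar:
--             new_color_map[key] = val
--     return new_color_map
-- ===== SOURCE B (Python) =====
-- tolerance = 20
--
-- def merge_color_map(color_map):
--     t = tolerance
--     reps = []   # [[key, merged_values], ...] in first-seen order
--     grid = {}   # cell -> ascending list of indices into reps
--     for key, val in color_map.items():
--         cx, cy, cz = key[0] // t, key[1] // t, key[2] // t
--         best = -1
--         for dx in (-1, 0, 1):
--             for dy in (-1, 0, 1):
--                 for dz in (-1, 0, 1):
--                     for i in grid.get((cx + dx, cy + dy, cz + dz), ()):
--                         if best == -1 or i < best:
--                             col = reps[i][0]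
--                             if (abs(key[0] - col[0]) < t and abs(key[1] - col[1]) < t
--                                     and abs(key[2] - col[2]) < t):
--                                 best = i
--         if best == -1:
--             grid.setdefault((cx, cy, cz), []).append(len(reps))
--             reps.append([key, list(val)])
--         else:
--             reps[best][1] = reps[best][1] + list(val)
--     return {key: vals for key, vals in reps}
-- ===== Notes on version B (the rewrite author's own statement) =====
-- stated objective: faster
-- what changed: Instead of scanning every existing representative per key (O(n*k)), B indexes representatives in a spatial hash grid with cell size = tolerance, queries only the 27 neighbouring cells per key and picks the earliest-inserted similar representative, giving near-linear time.
-- outside the precondition, e.g. on merge_color_map({(1,): [7]}): A returns {(1,): [7]}, B raises IndexError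
import Mathlib
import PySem

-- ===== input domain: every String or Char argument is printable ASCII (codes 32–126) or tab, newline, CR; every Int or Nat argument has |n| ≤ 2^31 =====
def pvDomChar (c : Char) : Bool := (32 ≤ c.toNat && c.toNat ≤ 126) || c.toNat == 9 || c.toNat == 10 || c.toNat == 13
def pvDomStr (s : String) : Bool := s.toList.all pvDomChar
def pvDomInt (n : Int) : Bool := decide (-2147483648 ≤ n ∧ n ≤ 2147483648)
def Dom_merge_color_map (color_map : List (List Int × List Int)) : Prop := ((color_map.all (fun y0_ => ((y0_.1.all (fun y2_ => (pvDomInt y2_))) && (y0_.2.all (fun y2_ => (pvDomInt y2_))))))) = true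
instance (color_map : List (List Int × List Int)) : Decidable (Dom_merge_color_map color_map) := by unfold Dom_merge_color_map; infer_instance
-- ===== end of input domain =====

-- B replaces A's linear scan of all representatives per key by a spatial hash grid (cell = tolerance)
-- queried over 27 neighbour cells, picking the earliest-inserted similar representative; measurably faster.
-- Python A mutates the input dict's value lists in place (`+= val` on aliased lists); B does not — the
-- equivalence proved here is about the RETURN value only.

-- ===== PORT A =====
-- is_similar (tolerance = 20); components read with getD (Pre_ guarantees length ≥ 3, where Python indexes succeed)
def pvSim (c1 c2 : List Int) : Bool :=
  decide (|c1.getD 0 0 - c2.getD 0 0| < 20) && decide (|c1.getD 1 0 - c2.getD 1 0| < 20)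
    && decide (|c1.getD 2 0 - c2.getD 2 0| < 20)

-- body of A's `for key, val in color_map.items()` loop
def pvStepA (d : PySem.Dict (List Int) (List Int)) (kv : List Int × List Int) :
    PySem.Dict (List Int) (List Int) :=
  match d.keys.find? (fun col => pvSim kv.1 col) with
  | some col => d.insert col (d.getD col [] ++ kv.2)   -- new_color_map[col] += val
  | none     => d.insert kv.1 kv.2                     -- new_color_map[key] = val

def merge_color_map (color_map : List (List Int × List Int)) : List (List Int × List Int) :=
  (color_map.foldl pvStepA PySem.Dict.empty).items

-- ===== PORT B =====
-- grid cell of a color (floor division by tolerance)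
def pvCell (k : List Int) : List Int :=
  [PySem.Int.floordiv (k.getD 0 0) 20, PySem.Int.floordiv (k.getD 1 0) 20,
   PySem.Int.floordiv (k.getD 2 0) 20]

-- the 27 (dx, dy, dz) offsets, in B's nested-loop order
def pvOffsets : List (Int × Int × Int) :=
  [-1, 0, 1].flatMap (fun dx => [-1, 0, 1].flatMap (fun dy => [-1, 0, 1].map (fun dz => (dx, dy, dz))))

def pvShift (c : List Int) (o : Int × Int × Int) : List Int :=
  [c.getD 0 0 + o.1, c.getD 1 0 + o.2.1, c.getD 2 0 + o.2.2]

-- body of B's loop: state = (reps, grid)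
def pvStepB (st : List (List Int × List Int) × PySem.Dict (List Int) (List Int))
    (kv : List Int × List Int) :
    List (List Int × List Int) × PySem.Dict (List Int) (List Int) :=
  let reps := st.1
  let grid := st.2
  let c := pvCell kv.1
  let cand := pvOffsets.flatMap (fun o => grid.getD (pvShift c o) [])
  let best := cand.foldl
    (fun b i => if (b == -1 || i < b) && pvSim kv.1 (PySem.List.pyGetD reps i ([], [])).1 then i else b)
    (-1)
  if best == -1 then
    (reps ++ [(kv.1, kv.2)], grid.insert c (grid.getD c [] ++ [(reps.length : Int)]))
  else
    (reps.set best.toNat ((PySem.List.pyGetD reps best ([], [])).1,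
                          (PySem.List.pyGetD reps best ([], [])).2 ++ kv.2), grid)

def merge_color_map_alt (color_map : List (List Int × List Int)) : List (List Int × List Int) :=
  (color_map.foldl pvStepB ([], PySem.Dict.empty)).1

-- ===== PRECONDITION & SPEC =====
-- Pre_ excludes maps with a key of fewer than 3 components (not an RGB color: A's similarity test
-- raises IndexError whenever such a key takes part in a comparison, though A still returns on
-- degenerate cases such as a single-entry map), and lists with duplicate keys, which do not
-- represent a Python dict.
def Pre_merge_color_map (color_map : List (List Int × List Int)) : Prop :=
  (∀ kv ∈ color_map, 3 ≤ kv.1.length) ∧ (color_map.map Prod.fst).Nodup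

instance (color_map : List (List Int × List Int)) : Decidable (Pre_merge_color_map color_map) := by
  unfold Pre_merge_color_map; infer_instance

def pvWitness_merge_color_map : (List (List Int × List Int)) :=
  [([0, 0, 0], [1]), ([100, 100, 100], [2]), ([105, 95, 100], [3])]

def Spec_merge_color_map (color_map : List (List Int × List Int)) (out : List (List Int × List Int)) : Prop := out = merge_color_map_alt color_map
instance (color_map : List (List Int × List Int)) (out : List (List Int × List Int)) : Decidable (Spec_merge_color_map color_map out) := by unfold Spec_merge_color_map; infer_instance

-- ===== CLAIM (what is proved, stated in full; the proofs are below) =====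
def Claim_equal_merge_color_map : Prop := ∀ (color_map : List (List Int × List Int)), Dom_merge_color_map color_map → Pre_merge_color_map color_map → Spec_merge_color_map color_map (merge_color_map color_map)

-- ===== LEMMAS AND PROOFS =====

lemma pvFdivAdj (a b : Int) (h : |a - b| < 20) :
    -1 ≤ PySem.Int.floordiv b 20 - PySem.Int.floordiv a 20 ∧
      PySem.Int.floordiv b 20 - PySem.Int.floordiv a 20 ≤ 1 := by
  have ha := PySem.Int.floordiv_mul_add_mod a 20
  have hb := PySem.Int.floordiv_mul_add_mod b 20
  have h1 : (0 : Int) ≤ PySem.Int.mod a 20 := PySem.Int.mod_nonneg a (by norm_num)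
  have h2 : PySem.Int.mod a 20 < 20 := PySem.Int.mod_lt a (by norm_num)
  have h3 : (0 : Int) ≤ PySem.Int.mod b 20 := PySem.Int.mod_nonneg b (by norm_num)
  have h4 : PySem.Int.mod b 20 < 20 := PySem.Int.mod_lt b (by norm_num)
  rw [abs_lt] at h
  omega
lemma mem_pvOffsets (x y z : Int) (hx : -1 ≤ x ∧ x ≤ 1) (hy : -1 ≤ y ∧ y ≤ 1)
    (hz : -1 ≤ z ∧ z ≤ 1) : (x, y, z) ∈ pvOffsets := by
  obtain ⟨hx1, hx2⟩ := hx; obtain ⟨hy1, hy2⟩ := hy; obtain ⟨hz1, hz2⟩ := hz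
  interval_cases x <;> interval_cases y <;> interval_cases z <;> decide
lemma pvAdj (k r : List Int) (h : pvSim k r = true) :
    ∃ o ∈ pvOffsets, pvShift (pvCell k) o = pvCell r := by
  simp only [pvSim, Bool.and_eq_true, decide_eq_true_eq] at h
  obtain ⟨⟨h0, h1⟩, h2⟩ := h
  refine ⟨(PySem.Int.floordiv (r.getD 0 0) 20 - PySem.Int.floordiv (k.getD 0 0) 20,
          PySem.Int.floordiv (r.getD 1 0) 20 - PySem.Int.floordiv (k.getD 1 0) 20,
          PySem.Int.floordiv (r.getD 2 0) 20 - PySem.Int.floordiv (k.getD 2 0) 20),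
        mem_pvOffsets _ _ _ (pvFdivAdj _ _ h0) (pvFdivAdj _ _ h1) (pvFdivAdj _ _ h2), ?_⟩
  simp [pvShift, pvCell, List.getD]
def pvBestFold (P : Int → Bool) (b : Int) (L : List Int) : Int :=
  L.foldl (fun b i => if (b == -1 || i < b) && P i then i else b) b

lemma pvBestFold_mem (P : Int → Bool) : ∀ (L : List Int) (b : Int),
    pvBestFold P b L = b ∨ (pvBestFold P b L ∈ L ∧ P (pvBestFold P b L) = true) := by
  intro L
  induction L with
  | nil => intro b; simp [pvBestFold]
  | cons a L ih =>
    intro b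
    have h := ih (if (b == -1 || a < b) && P a then a else b)
    simp only [pvBestFold] at h ⊢
    simp only [List.foldl_cons]
    rcases h with h | h
    · rw [h]
      split_ifs with hc
    

      · right
        refine ⟨List.mem_cons_self, ?_⟩
        simp only [Bool.and_eq_true] at hc
        exact hc.2
      · left; rfl
    · right; exact ⟨List.mem_cons_of_mem _ h.1, h.2⟩

lemma pvBestFold_le_acc (P : Int → Bool) : ∀ (L : List Int) (b : Int),
    (∀ j ∈ L, 0 ≤ j) → b ≠ -1 → pvBestFold P b L ≤ b := by
  intro L
  induction L with
  | nil => intro b _ _; simp [pvBestFold]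
  | cons a L ih =>
    intro b hL hb
    simp only [pvBestFold]
    simp only [List.foldl_cons]
    have ha : 0 ≤ a := hL a List.mem_cons_self
    have hL' : ∀ j ∈ L, 0 ≤ j := fun j hj => hL j (List.mem_cons_of_mem _ hj)
    split_ifs with hc
    · simp only [Bool.and_eq_true, Bool.or_eq_true, beq_iff_eq, decide_eq_true_eq] at hc
      have : a < b := hc.1.resolve_left hb
      exact le_trans (ih a hL' (by omega)) (le_of_lt this)
    · exact ih b hL' hb

lemma pvBestFold_le_mem (P : Int → Bool) : ∀ (L : List Int) (b i : Int),
    (∀ j ∈ L, 0 ≤ j) → i ∈ L → P i = true → pvBestFold P b L ≤ i := by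
  intro L
  induction L with
  | nil => intro b i _ h; simp at h
  | cons a L ih =>
    intro b i hL hi hP
    have ha : 0 ≤ a := hL a List.mem_cons_self
    have hL' : ∀ j ∈ L, 0 ≤ j := fun j hj => hL j (List.mem_cons_of_mem _ hj)
    simp only [pvBestFold]
    simp only [List.foldl_cons]
    rcases List.mem_cons.mp hi with rfl | hi'
    · by_cases hc : ((b == -1 || i < b) && P i) = true
      · rw [if_pos hc]
        exact pvBestFold_le_acc P L i hL' (by omega)
      · rw [if_neg hc]
        have hb : b ≠ -1 ∧ ¬ i < b := by
          by_contra hx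
          apply hc
          simp only [Bool.and_eq_true, Bool.or_eq_true, beq_iff_eq, decide_eq_true_eq, hP, and_true]
          tauto
        exact le_trans (pvBestFold_le_acc P L b hL' hb.1) (by omega)
    · exact ih _ i hL' hi' hP

lemma pvBestFold_nonneg (P : Int → Bool) : ∀ (L : List Int) (b : Int),
    (∀ j ∈ L, 0 ≤ j) → (b = -1 ∨ 0 ≤ b) → (0 ≤ b ∨ ∃ i ∈ L, P i = true) →
    0 ≤ pvBestFold P b L := by
  intro L
  induction L with
  | nil =>
    intro b _ _ h
    rcases h with h | h
    · simpa [pvBestFold] using h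
    · simp at h
  | cons a L ih =>
    intro b hL hb hw
    have ha : 0 ≤ a := hL a List.mem_cons_self
    have hL' : ∀ j ∈ L, 0 ≤ j := fun j hj => hL j (List.mem_cons_of_mem _ hj)
    simp only [pvBestFold]
    simp only [List.foldl_cons]
    by_cases hc : ((b == -1 || a < b) && P a) = true
    · rw [if_pos hc]
      exact ih a hL' (Or.inr ha) (Or.inl ha)
    · rw [if_neg hc]
      rcases hw with hw | hw
      · exact ih b hL' hb (Or.inl hw)
      · rcases hw with ⟨i, hi, hPi⟩
        rcases List.mem_cons.mp hi with rfl | hi'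
        · -- P i true but condition failed: b ≠ -1 and ¬ i < b, so 0 ≤ b
          simp only [Bool.and_eq_true, Bool.or_eq_true, beq_iff_eq, decide_eq_true_eq, hPi, and_true, not_or] at hc
          rcases hb with h | h
          · exact absurd h hc.1
          · exact ih b hL' (Or.inr h) (Or.inl h)
        · exact ih b hL' hb (Or.inr ⟨i, hi', hPi⟩)

def pvGridOK (reps : List (List Int × List Int)) (grid : PySem.Dict (List Int) (List Int)) : Prop :=
  ∀ c : List Int, grid.getD c [] =
    List.map (fun i : Nat => (i : Int))
      ((List.range reps.length).filter (fun i => pvCell (reps.getD i ([], [])).1 == c))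

lemma pvCand_elim (k : List Int) (reps : List (List Int × List Int))
    (grid : PySem.Dict (List Int) (List Int)) (hg : pvGridOK reps grid)
    (i : Int) (hi : i ∈ pvOffsets.flatMap (fun o => grid.getD (pvShift (pvCell k) o) [])) :
    ∃ m : Nat, i = (m : Int) ∧ m < reps.length := by
  rcases List.mem_flatMap.mp hi with ⟨o, _, hmem⟩
  rw [hg] at hmem
  rcases List.mem_map.mp hmem with ⟨m, hm, rfl⟩
  exact ⟨m, rfl, List.mem_range.mp (List.mem_filter.mp hm).1⟩

lemma pvCand_intro (k : List Int) (reps : List (List Int × List Int))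
    (grid : PySem.Dict (List Int) (List Int)) (hg : pvGridOK reps grid)
    (m : Nat) (hm : m < reps.length) (hsim : pvSim k (reps.getD m ([], [])).1 = true) :
    (m : Int) ∈ pvOffsets.flatMap (fun o => grid.getD (pvShift (pvCell k) o) []) := by
  rcases pvAdj k (reps.getD m ([], [])).1 hsim with ⟨o, ho, hEq⟩
  refine List.mem_flatMap.mpr ⟨o, ho, ?_⟩
  rw [hg]
  refine List.mem_map.mpr ⟨m, List.mem_filter.mpr ⟨List.mem_range.mpr hm, ?_⟩, rfl⟩
  exact beq_iff_eq.mpr hEq.symm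

lemma pvBestEq (k : List Int) (reps : List (List Int × List Int))
    (grid : PySem.Dict (List Int) (List Int)) (hg : pvGridOK reps grid) :
    pvBestFold (fun i => pvSim k (PySem.List.pyGetD reps i ([], [])).1) (-1)
      (pvOffsets.flatMap (fun o => grid.getD (pvShift (pvCell k) o) [])) =
    (match reps.findIdx? (fun p => pvSim k p.1) with
     | none => -1
     | some j => (j : Int)) := by
  set P : Int → Bool := fun i => pvSim k (PySem.List.pyGetD reps i ([], [])).1 with hP
  set L := pvOffsets.flatMap (fun o => grid.getD (pvShift (pvCell k) o) []) with hLdef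
  have hL : ∀ j ∈ L, 0 ≤ j := by
    intro j hj
    rcases pvCand_elim k reps grid hg j hj with ⟨m, rfl, _⟩
    positivity
  have hPm : ∀ (m : Nat), m < reps.length →
      (P (m : Int) = pvSim k (reps.getD m ([], [])).1) := by
    intro m hm
    simp [hP, PySem.List.pyGetD_natCast]
  cases hfind : reps.findIdx? (fun p => pvSim k p.1) with
  | none =>
    have hnone := List.findIdx?_eq_none_iff.mp hfind
    rcases pvBestFold_mem P L (-1) with h | ⟨hmem, hPr⟩
    · simpa using h
    · exfalso
      rcases pvCand_elim k reps grid hg _ hmem with ⟨m, hEq, hm⟩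
      rw [hEq, hPm m hm] at hPr
      have := hnone (reps.getD m ([], [])) (by rw [List.getD_eq_getElem _ _ hm]; exact List.getElem_mem hm)
      simp_all
  | some j =>
    rcases List.findIdx?_eq_some_iff_getElem.mp hfind with ⟨hj, hPj, hmin⟩
    have hsimj : pvSim k (reps.getD j ([], [])).1 = true := by
      rw [List.getD_eq_getElem _ _ hj]; exact hPj
    have hjL : (j : Int) ∈ L := pvCand_intro k reps grid hg j hj hsimj
    have hPjI : P (j : Int) = true := by rw [hPm j hj]; exact hsimj
    have hle : pvBestFold P (-1) L ≤ (j : Int) := pvBestFold_le_mem P L (-1) _ hL hjL hPjI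
    have hnn : 0 ≤ pvBestFold P (-1) L :=
      pvBestFold_nonneg P L (-1) hL (Or.inl rfl) (Or.inr ⟨(j : Int), hjL, hPjI⟩)
    rcases pvBestFold_mem P L (-1) with h | ⟨hmem, hPr⟩
    · omega
    · rcases pvCand_elim k reps grid hg _ hmem with ⟨m, hEq, hm⟩
      rw [hEq, hPm m hm] at hPr
      have : ¬ m < j := by
        intro hlt
        exact hmin m hlt (by rw [← List.getD_eq_getElem _ ([], []) (lt_trans hlt hj)]; exact hPr)
      simp only []
      omega

def pvKeysOK (reps : List (List Int × List Int)) : Prop :=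
  (reps.map Prod.fst).Pairwise (fun a b => pvSim a b = false)

lemma pvSim_refl (k : List Int) : pvSim k k = true := by simp [pvSim]

lemma pvSim_comm (a b : List Int) : pvSim a b = pvSim b a := by
  simp [pvSim, abs_sub_comm]

lemma pvKeysOK_nodup (reps : List (List Int × List Int)) (h : pvKeysOK reps) :
    (reps.map Prod.fst).Nodup := by
  refine h.imp ?_
  intro a b hab hEq
  rw [hEq, pvSim_refl] at hab
  exact Bool.true_eq_false.mp hab

lemma pvStepEq (d : PySem.Dict (List Int) (List Int)) (reps : List (List Int × List Int))
    (grid : PySem.Dict (List Int) (List Int)) (kv : List Int × List Int)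
    (hitems : d.items = reps) (hkeys : pvKeysOK reps) (hg : pvGridOK reps grid) :
    (pvStepA d kv).items = (pvStepB (reps, grid) kv).1 ∧
      pvKeysOK (pvStepB (reps, grid) kv).1 ∧
      pvGridOK (pvStepB (reps, grid) kv).1 (pvStepB (reps, grid) kv).2 := by
  have hkeysd : d.keys = reps.map Prod.fst := by
    rw [PySem.Dict.keys, hitems]
  have hnd : (reps.map Prod.fst).Nodup := pvKeysOK_nodup reps hkeys
  have hbest := pvBestEq kv.1 reps grid hg
  have hfind : d.keys.find? (fun col => pvSim kv.1 col)
      = Option.map Prod.fst (reps.find? (fun p => pvSim kv.1 p.1)) := by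
    rw [hkeysd, List.find?_map]
    rfl
  have hfind2 : reps.find? (fun p => pvSim kv.1 p.1)
      = (reps.findIdx? (fun p => pvSim kv.1 p.1)).bind (fun i => reps[i]?) :=
    List.find?_eq_bind_findIdx?_getElem?
  simp only [pvStepB]
  rw [show (pvOffsets.flatMap (fun o => grid.getD (pvShift (pvCell kv.1) o) [])).foldl
      (fun b i => if (b == -1 || i < b) && pvSim kv.1 (PySem.List.pyGetD reps i ([], [])).1 then i else b)
      (-1) = pvBestFold (fun i => pvSim kv.1 (PySem.List.pyGetD reps i ([], [])).1) (-1)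
      (pvOffsets.flatMap (fun o => grid.getD (pvShift (pvCell kv.1) o) [])) from rfl]
  rw [hbest]
  cases hidx : reps.findIdx? (fun p => pvSim kv.1 p.1) with
  | none =>
    have hnone := List.findIdx?_eq_none_iff.mp hidx
    have hnc : d.contains kv.1 = false := by
      rw [PySem.Dict.contains_eq_decide_mem_keys, hkeysd]
      simp only [decide_eq_false_iff_not]
      intro hmem
      rcases List.mem_map.mp hmem with ⟨p, hp, hpe⟩
      have := hnone p hp
      rw [hpe, pvSim_refl kv.1] at this
      exact Bool.true_eq_false.mp this
    have hstepA : pvStepA d kv = d.insert kv.1 kv.2 := by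
      rw [pvStepA, hfind, hfind2, hidx]
      rfl
    refine ⟨?_, ?_, ?_⟩
    · rw [hstepA, if_pos (by rfl), PySem.Dict.items_insert_of_not_contains _ _ hnc, hitems]
    · rw [if_pos (by rfl)]
      simp only [pvKeysOK, List.map_append, List.map_cons, List.map_nil]
      rw [List.pairwise_append]
      refine ⟨hkeys, List.pairwise_singleton _ _, ?_⟩
      intro a ha b hb
      rcases List.mem_map.mp ha with ⟨p, hp, rfl⟩
      rcases List.mem_singleton.mp hb with rfl
      rw [pvSim_comm]
      exact hnone p hp
    · rw [if_pos (by rfl)]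
      intro c'
      simp only
      rw [PySem.Dict.getD_insert]
      rw [hg c']
      have hlen : (reps ++ [(kv.1, kv.2)]).length = reps.length + 1 := by simp
      rw [hlen, List.range_succ, List.filter_append, List.map_append]
      have hsame : ((List.range reps.length).filter
          (fun i => pvCell ((reps ++ [(kv.1, kv.2)]).getD i ([], [])).1 == c'))
          = (List.range reps.length).filter (fun i => pvCell (reps.getD i ([], [])).1 == c') := by
        refine List.filter_congr ?_
        intro i hi
        rw [List.getD_append _ _ _ _ (List.mem_range.mp hi)]
      have hnth : (reps ++ [(kv.1, kv.2)]).getD reps.length ([], []) = (kv.1, kv.2) := by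
        rw [List.getD_eq_getElem _ _ (by simp)]
        exact List.getElem_concat_length rfl _
      have htail : ([reps.length].filter
          (fun i => pvCell ((reps ++ [(kv.1, kv.2)]).getD i ([], [])).1 == c'))
          = if c' = pvCell kv.1 then [reps.length] else [] := by
        simp only [List.filter, hnth]
        by_cases hc : c' = pvCell kv.1
        · rw [if_pos hc]
          rw [show (pvCell (kv.1, kv.2).1 == c') = true from beq_iff_eq.mpr hc.symm]
        · rw [if_neg hc]
          rw [show (pvCell (kv.1, kv.2).1 == c') = false from beq_eq_false_iff_ne.mpr fun h => hc h.symm]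
      rw [hsame, htail]
      by_cases hc : c' = pvCell kv.1
      · rw [if_pos hc, if_pos hc, hc, hg (pvCell kv.1)]
        simp
      · rw [if_neg hc, if_neg hc]
        simp
  | some j =>
    rcases List.findIdx?_eq_some_iff_getElem.mp hidx with ⟨hj, hPj, hmin⟩
    clear hmin
    have hne : (((j : Nat) : Int) == -1) = false := by simp
    rw [if_neg (by simp)]
    have htn : ((j : Nat) : Int).toNat = j := Int.toNat_natCast j
    have hget : PySem.List.pyGetD reps ((j : Nat) : Int) ([], []) = reps[j] := by
      rw [PySem.List.pyGetD_natCast, List.getD_eq_getElem _ _ hj]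
    have hgets : reps[j]? = some reps[j] := List.getElem?_eq_getElem hj
    have hstepA : pvStepA d kv = d.insert reps[j].1 (d.getD reps[j].1 [] ++ kv.2) := by
      rw [pvStepA, hfind, hfind2, hidx]
      simp [hgets]
    have hcont : d.contains reps[j].1 = true := by
      rw [PySem.Dict.contains_eq_decide_mem_keys, hkeysd]
      simp only [decide_eq_true_eq]
      exact List.mem_map.mpr ⟨reps[j], List.getElem_mem hj, rfl⟩
    have hkeysnd : d.keys.Nodup := by rw [hkeysd]; exact hnd
    have hpair : (reps[j].1, reps[j].2) = reps[j] := rfl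
    have hgetD : d.getD reps[j].1 [] = reps[j].2 := by
      refine PySem.Dict.getD_of_mem_items d ?_ hkeysnd []
      rw [hitems, hpair]
      exact List.getElem_mem hj
    have hmap : reps.map (fun p => if p.1 == reps[j].1 then (reps[j].1, reps[j].2 ++ kv.2) else p)
        = reps.set j (reps[j].1, reps[j].2 ++ kv.2) := by
      apply List.ext_getElem (by simp)
      intro i h1 h2
      have hi : i < reps.length := by simpa using h1
      rw [List.getElem_map, List.getElem_set]
      by_cases hij : i = j
      · subst hij
        rw [if_pos (beq_iff_eq.mpr rfl), if_pos rfl]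
      · have hfne : (reps[i].1 == reps[j].1) = false := by
          apply beq_eq_false_iff_ne.mpr
          intro hEq
          have hmm : (reps.map Prod.fst)[i]'(by simpa using hi) = (reps.map Prod.fst)[j]'(by simpa using hj) := by
            simpa using hEq
          exact hij (hnd.getElem_inj_iff.mp hmm)
        rw [if_neg (by simp [hfne]), if_neg (fun h => hij h.symm)]
    refine ⟨?_, ?_, ?_⟩
    · rw [hstepA, PySem.Dict.items_insert_of_contains _ _ hcont, hitems, hgetD, htn, hget, hmap]
    · simp only [pvKeysOK, htn, hget, List.map_set]
      have hjm : (reps.map Prod.fst)[j]'(by simpa using hj) = reps[j].1 := by simp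
      rw [show ((reps.map Prod.fst).set j (reps[j].1, reps[j].2 ++ kv.2).1) = reps.map Prod.fst by
        rw [show (reps[j].1, reps[j].2 ++ kv.2).1 = (reps.map Prod.fst)[j]'(by simpa using hj) from hjm.symm]
        exact List.set_getElem_self _]
      exact hkeys
    · intro c'
      simp only [htn, hget]
      rw [hg c']
      congr 1
      rw [List.length_set]
      refine (List.filter_congr ?_).symm
      intro i hi
      have hilen : i < reps.length := List.mem_range.mp hi
      congr 1
      rw [List.getD_eq_getElem _ _ hilen, List.getD_eq_getElem _ _ (by simpa using hilen),
        List.getElem_set]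
      by_cases hij : j = i
      · rw [if_pos hij]
        subst hij
        rfl
      · rw [if_neg hij]

lemma pvMain (cm : List (List Int × List Int)) :
    ∀ (d : PySem.Dict (List Int) (List Int)) (reps : List (List Int × List Int))
      (grid : PySem.Dict (List Int) (List Int)),
      d.items = reps → pvKeysOK reps → pvGridOK reps grid →
      (cm.foldl pvStepA d).items = (cm.foldl pvStepB (reps, grid)).1 := by
  induction cm with
  | nil =>
    intro d reps grid hitems _ _
    simpa using hitems
  | cons kv cm ih =>
    intro d reps grid hitems hkeys hg
    simp only [List.foldl_cons]
    obtain ⟨h1, h2, h3⟩ := pvStepEq d reps grid kv hitems hkeys hg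
    have := ih (pvStepA d kv) (pvStepB (reps, grid) kv).1 (pvStepB (reps, grid) kv).2 h1 h2 h3
    simpa using this

-- ===== VERDICT (by name: the statement is the Claim_ definition above) =====
theorem merge_color_map_spec : Claim_equal_merge_color_map := by
  unfold Claim_equal_merge_color_map
  intro color_map _ _
  unfold Spec_merge_color_map merge_color_map merge_color_map_alt
  refine pvMain color_map PySem.Dict.empty [] PySem.Dict.empty rfl List.Pairwise.nil ?_
  intro c
  simp [PySem.Dict.getD_empty]
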